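-- pv_equiv track=rewrite | github.com/lcsmith/advent-of-code | 2022/day18/steamy.py | are_adjacent
-- ===== SOURCE A (Python) =====
-- def are_adjacent(cube1, cube2):
--     same = 0
--     one_away = 0
--     for dimension in range(3):
--         if cube1[dimension] == cube2[dimension]:
--             same += 1
--         if abs(cube1[dimension] - cube2[dimension]) == 1:
--             one_away += 1
--     return same == 2 and one_away == 1
-- ===== SOURCE B (Python) =====
-- def are_adjacent(cube1, cube2):
--     return sorted(abs(cube1[d] - cube2[d]) for d in range(3)) == [0, 0, 1]
-- ===== Notes on version B (the rewrite author's own statement) =====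
-- stated objective: simpler
-- what changed: Replaces A's two running counters (same, one_away) over an index loop by a normalize-and-compare step: sort the three absolute per-dimension differences and compare to the canonical template [0, 0, 1].
import Mathlib
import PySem

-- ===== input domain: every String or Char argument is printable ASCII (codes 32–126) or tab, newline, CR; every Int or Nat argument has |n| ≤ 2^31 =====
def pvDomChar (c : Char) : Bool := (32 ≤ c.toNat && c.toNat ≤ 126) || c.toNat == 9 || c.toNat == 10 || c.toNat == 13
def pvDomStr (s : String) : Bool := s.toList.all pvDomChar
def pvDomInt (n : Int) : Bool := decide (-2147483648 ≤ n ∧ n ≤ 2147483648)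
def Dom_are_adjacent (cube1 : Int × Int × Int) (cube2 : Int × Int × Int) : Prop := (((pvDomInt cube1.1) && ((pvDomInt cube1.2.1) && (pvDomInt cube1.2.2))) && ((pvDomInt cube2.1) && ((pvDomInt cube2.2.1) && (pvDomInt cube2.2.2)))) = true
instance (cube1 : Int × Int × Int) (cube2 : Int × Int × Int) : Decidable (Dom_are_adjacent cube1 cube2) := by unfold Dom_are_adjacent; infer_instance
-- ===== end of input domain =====

-- B replaces A's two counters (same, one_away) by sorting the three absolute
-- per-dimension differences and comparing to the canonical template [0, 0, 1] (objective: simpler).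
-- ===== PORT A =====
-- tuple indexing cube[d] for the indices 0, 1, 2 produced by range(3)
def pvTupGet (c : Int × Int × Int) (d : Nat) : Int :=
  if d = 0 then c.1 else if d = 1 then c.2.1 else c.2.2

-- A: loop over range(3) maintaining the two counters same / one_away
def are_adjacent (cube1 : Int × Int × Int) (cube2 : Int × Int × Int) : Bool :=
  let st := (List.range 3).foldl (fun (acc : Int × Int) dimension =>
    let same := if pvTupGet cube1 dimension == pvTupGet cube2 dimension then acc.1 + 1 else acc.1
    let one_away := if |pvTupGet cube1 dimension - pvTupGet cube2 dimension| == 1 then acc.2 + 1 else acc.2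
    (same, one_away)) (0, 0)
  st.1 == 2 && st.2 == 1

-- ===== PORT B =====
-- B: sort the absolute per-dimension differences and compare to the canonical template
def are_adjacent_alt (cube1 : Int × Int × Int) (cube2 : Int × Int × Int) : Bool :=
  PySem.List.sorted ((List.range 3).map (fun d => |pvTupGet cube1 d - pvTupGet cube2 d|)) (fun x => x) false == [0, 0, 1]

-- ===== PRECONDITION & SPEC =====
def Spec_are_adjacent (cube1 : Int × Int × Int) (cube2 : Int × Int × Int) (out : Bool) : Prop := out = are_adjacent_alt cube1 cube2
instance (cube1 : Int × Int × Int) (cube2 : Int × Int × Int) (out : Bool) : Decidable (Spec_are_adjacent cube1 cube2 out) := by unfold Spec_are_adjacent; infer_instance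

-- ===== CLAIM (what is proved, stated in full; the proofs are below) =====
def Claim_equal_are_adjacent : Prop := ∀ (cube1 : Int × Int × Int) (cube2 : Int × Int × Int), Dom_are_adjacent cube1 cube2 → Spec_are_adjacent cube1 cube2 (are_adjacent cube1 cube2)

-- ===== LEMMAS AND PROOFS =====
-- sorted [P, Q, R] equals the template [0, 0, 1] exactly on the three arrangements of (0, 0, 1)
lemma sortedB_iff (P Q R : Int) :
    PySem.List.sorted [P, Q, R] (fun x => x) false = [0, 0, 1] ↔
      (P = 0 ∧ Q = 0 ∧ R = 1) ∨ (P = 0 ∧ Q = 1 ∧ R = 0) ∨ (P = 1 ∧ Q = 0 ∧ R = 0) := by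
  constructor
  · intro h
    have hperm : [P, Q, R].Perm [0, 0, 1] :=
      (h ▸ PySem.List.sorted_perm [P, Q, R] (fun x => x) false).symm
    have h0 := hperm.count_eq 0
    have h1 := hperm.count_eq 1
    simp only [List.count_cons, List.count_nil, beq_iff_eq] at h0 h1
    split_ifs at h0 h1 <;> omega
  · rintro (⟨rfl, rfl, rfl⟩ | ⟨rfl, rfl, rfl⟩ | ⟨rfl, rfl, rfl⟩) <;>
      (apply PySem.List.sorted_id_eq_of_perm_of_pairwise <;> decide)

-- ===== VERDICT (by name: the statement is the Claim_ definition above) =====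
theorem are_adjacent_spec : Claim_equal_are_adjacent := by
  intro cube1 cube2 _
  obtain ⟨a1, b1, c1⟩ := cube1
  obtain ⟨a2, b2, c2⟩ := cube2
  unfold Spec_are_adjacent are_adjacent are_adjacent_alt
  simp only [List.range_succ, List.range_zero, List.nil_append, List.cons_append,
    List.foldl_cons, List.foldl_nil, List.map_cons, List.map_nil, pvTupGet]
  norm_num only
  simp only [if_true, if_false]
  rw [Bool.eq_iff_iff]
  simp only [Bool.and_eq_true, beq_iff_eq]
  rw [sortedB_iff]
  have hP := abs_nonneg (a1 - a2)
  have hQ := abs_nonneg (b1 - b2)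
  have hR := abs_nonneg (c1 - c2)
  have e1 : (a1 = a2) ↔ |a1 - a2| = 0 := by rw [abs_eq_zero, sub_eq_zero]
  have e2 : (b1 = b2) ↔ |b1 - b2| = 0 := by rw [abs_eq_zero, sub_eq_zero]
  have e3 : (c1 = c2) ↔ |c1 - c2| = 0 := by rw [abs_eq_zero, sub_eq_zero]
  generalize |a1 - a2| = P at hP e1 ⊢
  generalize |b1 - b2| = Q at hQ e2 ⊢
  generalize |c1 - c2| = R at hR e3 ⊢
  split_ifs <;> omega
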